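-- pv_equiv track=rewrite | github.com/Akurosia/DevFFXIVPocketGuide | ffxiv_guide_xlsx_to_file.py | getBeforeAndAfterContentEntries
-- ===== SOURCE A (Python) =====
-- def getBeforeAndAfterContentEntries(orderedContent, entry):
--     _previous = None
--     _next = None
--     _type = orderedContent[entry['instanceType']]
--     _typeKeys = list(_type)
--     for i, k in enumerate(_type):
--         if _type[k].endswith(entry['slug']):
--             if i - 1 >= 0:
--                 try:
--                     _previous = _type[_typeKeys[i - 1]]
--                 except:
--                     pass
--             try:
--                 _next = _type[_typeKeys[i + 1]]
--             except:
--                 pass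
--             return _previous, _next
--     return None, None
-- ===== SOURCE B (Python) =====
-- def getBeforeAndAfterContentEntries(orderedContent, entry):
--     slug = entry['slug']
--     prev = None
--     found_prev = None
--     pending = False
--     for cur in orderedContent[entry['instanceType']].values():
--         if pending:
--             return found_prev, cur
--         if cur.endswith(slug):
--             found_prev = prev
--             pending = True
--         prev = cur
--     if pending:
--         return found_prev, None
--     return None, None
-- ===== Notes on version B (the rewrite author's own statement) =====
-- stated objective: simpler
-- what changed: Single stateful pass over the dict's values carrying a 'previous value' and a 'match seen' flag, instead of materializing the key list and re-indexing the dict at i-1 and i+1 with try/except guards.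
import Mathlib
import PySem

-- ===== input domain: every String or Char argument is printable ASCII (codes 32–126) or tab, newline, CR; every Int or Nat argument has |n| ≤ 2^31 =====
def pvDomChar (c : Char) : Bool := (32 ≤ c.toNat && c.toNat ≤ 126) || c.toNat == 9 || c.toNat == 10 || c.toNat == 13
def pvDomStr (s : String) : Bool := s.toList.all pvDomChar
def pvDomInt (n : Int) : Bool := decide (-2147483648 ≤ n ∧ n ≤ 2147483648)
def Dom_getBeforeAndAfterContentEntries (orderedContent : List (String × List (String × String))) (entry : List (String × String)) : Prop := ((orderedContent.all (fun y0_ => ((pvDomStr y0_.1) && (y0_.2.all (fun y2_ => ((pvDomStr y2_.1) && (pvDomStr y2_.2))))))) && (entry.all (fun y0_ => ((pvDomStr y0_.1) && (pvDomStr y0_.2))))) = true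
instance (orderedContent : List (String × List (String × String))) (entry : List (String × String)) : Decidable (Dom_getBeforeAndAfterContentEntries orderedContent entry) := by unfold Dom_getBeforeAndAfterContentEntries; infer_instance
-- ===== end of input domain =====

-- B replaces A's key-list materialization and index arithmetic (i-1 / i+1 with
-- try/except) by a single stateful pass over the dict values; same result, simpler.

-- ===== PORT A =====
-- the 'for i, k in enumerate(_type)' loop: i is the enumerate counter, ks the remaining keys
def pvALoop (t : PySem.Dict String String) (typeKeys : List String) (slug : String) :
    Nat → List String → Option String × Option String
  | _, [] => (none, none)
  | i, k :: rest =>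
    if PySem.Str.endswith ((t.get? k).getD "") slug then
      -- _previous: guarded by 'if i - 1 >= 0', try/except KeyError → none;
      -- _next: try/except IndexError/KeyError → none
      ((if (i : Int) - 1 ≥ 0 then
          match PySem.List.pyGet? typeKeys ((i : Int) - 1) with
          | some k' => t.get? k'
          | none => none
        else none),
       (match PySem.List.pyGet? typeKeys ((i : Int) + 1) with
        | some k' => t.get? k'
        | none => none))
    else pvALoop t typeKeys slug (i + 1) rest

def getBeforeAndAfterContentEntries (orderedContent : List (String × List (String × String))) (entry : List (String × String)) : Option String × Option String :=
  let e := PySem.Dict.ofList entry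
  let t := PySem.Dict.ofList (((PySem.Dict.ofList orderedContent).get? ((e.get? "instanceType").getD "")).getD [])
  pvALoop t t.keys ((e.get? "slug").getD "") 0 t.keys

-- ===== PORT B =====
-- the stateful 'for cur in values' loop: prev / found_prev / pending threaded through
def pvBLoop (slug : String) : List String → Option String → Option String → Bool → Option String × Option String
  | [], _, foundPrev, pending => if pending then (foundPrev, none) else (none, none)
  | cur :: rest, prev, foundPrev, pending =>
    if pending then (foundPrev, some cur)
    else if PySem.Str.endswith cur slug then pvBLoop slug rest (some cur) prev true
    else pvBLoop slug rest (some cur) foundPrev pending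

def getBeforeAndAfterContentEntries_alt (orderedContent : List (String × List (String × String))) (entry : List (String × String)) : Option String × Option String :=
  let e := PySem.Dict.ofList entry
  let t := PySem.Dict.ofList (((PySem.Dict.ofList orderedContent).get? ((e.get? "instanceType").getD "")).getD [])
  pvBLoop ((e.get? "slug").getD "") t.values none none false

-- ===== PRECONDITION & SPEC =====
-- A (and B) raise KeyError unless entry has the keys 'instanceType' and 'slug' and
-- orderedContent has the named instanceType; Pre_ is exactly those non-raising inputs.
def Pre_getBeforeAndAfterContentEntries (orderedContent : List (String × List (String × String))) (entry : List (String × String)) : Prop :=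
  (PySem.Dict.ofList entry).contains "instanceType" = true ∧
  (PySem.Dict.ofList entry).contains "slug" = true ∧
  (PySem.Dict.ofList orderedContent).contains (((PySem.Dict.ofList entry).get? "instanceType").getD "") = true
instance (orderedContent : List (String × List (String × String))) (entry : List (String × String)) : Decidable (Pre_getBeforeAndAfterContentEntries orderedContent entry) := by unfold Pre_getBeforeAndAfterContentEntries; infer_instance

def pvWitness_getBeforeAndAfterContentEntries : (List (String × List (String × String))) × (List (String × String)) :=
  ([("trial", [("a", "the-vault"), ("b", "the-aery")])], [("instanceType", "trial"), ("slug", "aery")])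

def Spec_getBeforeAndAfterContentEntries (orderedContent : List (String × List (String × String))) (entry : List (String × String)) (out : Option String × Option String) : Prop := out = getBeforeAndAfterContentEntries_alt orderedContent entry
instance (orderedContent : List (String × List (String × String))) (entry : List (String × String)) (out : Option String × Option String) : Decidable (Spec_getBeforeAndAfterContentEntries orderedContent entry out) := by unfold Spec_getBeforeAndAfterContentEntries; infer_instance

-- ===== CLAIM (what is proved, stated in full; the proofs are below) =====
def Claim_equal_getBeforeAndAfterContentEntries : Prop := ∀ (orderedContent : List (String × List (String × String))) (entry : List (String × String)), Dom_getBeforeAndAfterContentEntries orderedContent entry → Pre_getBeforeAndAfterContentEntries orderedContent entry → Spec_getBeforeAndAfterContentEntries orderedContent entry (getBeforeAndAfterContentEntries orderedContent entry)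

-- ===== LEMMAS AND PROOFS =====

-- once pending is set, B returns its saved previous and the next value if any
lemma pvBLoop_pending (slug : String) (vals : List String) (prev fp : Option String) :
    pvBLoop slug vals prev fp true = (fp, vals.head?) := by
  cases vals <;> simp [pvBLoop]

-- the loop invariant: A at position pre.length over the remaining keys equals B over
-- the remaining values with prev = last value already passed
lemma pvLoop_eq (t : PySem.Dict String String) (slug : String)
    (pre suf : List (String × String)) (fp : Option String)
    (hitems : t.items = pre ++ suf) (hnd : t.keys.Nodup) :
    pvALoop t t.keys slug pre.length (suf.map Prod.fst) =
      pvBLoop slug (suf.map Prod.snd) ((pre.map Prod.snd).getLast?) fp false := by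
  induction suf generalizing pre fp with
  | nil => simp [pvALoop, pvBLoop]
  | cons p rest ih =>
    obtain ⟨k, v⟩ := p
    have hkeys : t.keys = pre.map Prod.fst ++ k :: rest.map Prod.fst := by
      simp [PySem.Dict.keys, hitems]
    have hget : t.get? k = some v :=
      PySem.Dict.get?_of_mem_items (d := t) (by simp [hitems]) hnd
    by_cases hm : PySem.Str.endswith v slug = true
    · have hprev : (if (pre.length : Int) - 1 ≥ 0 then
          match PySem.List.pyGet? t.keys ((pre.length : Int) - 1) with
          | some k' => t.get? k'
          | none => none
        else none) = (pre.map Prod.snd).getLast? := by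
        cases hpre : pre.reverse with
        | nil =>
          have : pre = [] := by simpa using congrArg List.reverse hpre
          subst this; simp
        | cons q qs =>
          have hpre' : pre = qs.reverse ++ [q] := by
            have := congrArg List.reverse hpre; simpa using this
          subst hpre'
          have hlen : ((qs.reverse ++ [q]).length : Int) - 1 = ((qs.reverse.map Prod.fst).length : Nat) := by
            simp
          have hidx : PySem.List.pyGet? t.keys (((qs.reverse ++ [q]).length : Int) - 1) = some q.1 := by
            rw [hlen, hkeys]
            have h2 : (qs.reverse ++ [q]).map Prod.fst ++ k :: rest.map Prod.fst
                = qs.reverse.map Prod.fst ++ q.1 :: (k :: rest.map Prod.fst) := by simp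
            rw [h2]
            exact PySem.List.pyGet?_append_length (qs.reverse.map Prod.fst) (k :: rest.map Prod.fst) q.1
          have hgq : t.get? q.1 = some q.2 :=
            PySem.Dict.get?_of_mem_items (d := t) (by simp [hitems]) hnd
          have hc : ((qs.reverse ++ [q]).length : Int) - 1 ≥ 0 := by simp
          rw [if_pos hc, hidx]
          simp [hgq]
      have hnext : (match PySem.List.pyGet? t.keys ((pre.length : Int) + 1) with
          | some k' => t.get? k'
          | none => none) = (rest.map Prod.snd).head? := by
        cases rest with
        | nil =>
          have hidx : PySem.List.pyGet? t.keys ((pre.length : Int) + 1) = none := by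
            rw [PySem.List.pyGet?_eq_none_iff, hkeys]
            simp [PySem.Raise.InRange]
          rw [hidx]
          rfl
        | cons q qs =>
          have hlen : ((pre.length : Int)) + 1 = (((pre.map Prod.fst) ++ [k]).length : Nat) := by simp
          have hidx : PySem.List.pyGet? t.keys ((pre.length : Int) + 1) = some q.1 := by
            rw [hlen, hkeys]
            have h2 : pre.map Prod.fst ++ k :: (q :: qs).map Prod.fst
                 = (pre.map Prod.fst ++ [k]) ++ q.1 :: qs.map Prod.fst := by simp
            rw [h2]
            exact PySem.List.pyGet?_append_length (pre.map Prod.fst ++ [k]) (qs.map Prod.fst) q.1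
          have hgq : t.get? q.1 = some q.2 :=
            PySem.Dict.get?_of_mem_items (d := t) (by simp [hitems]) hnd
          rw [hidx]
          simp [hgq]
      simp only [List.map_cons, pvALoop, pvBLoop, hget, Option.getD_some, hm, if_true,
        Bool.false_eq_true, if_false, pvBLoop_pending, hprev, hnext]
    · have hrec := ih (pre ++ [(k, v)]) fp (by simp [hitems])
      simp only [List.map_cons, pvALoop, pvBLoop, hget, Option.getD_some, hm,
        Bool.false_eq_true, if_false]
      simpa using hrec

-- ===== VERDICT (by name: the statement is the Claim_ definition above) =====
theorem getBeforeAndAfterContentEntries_spec : Claim_equal_getBeforeAndAfterContentEntries := by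
  intro orderedContent entry _ _
  unfold Spec_getBeforeAndAfterContentEntries
  unfold getBeforeAndAfterContentEntries getBeforeAndAfterContentEntries_alt
  show pvALoop
      (PySem.Dict.ofList (((PySem.Dict.ofList orderedContent).get? (((PySem.Dict.ofList entry).get? "instanceType").getD "")).getD []))
      (PySem.Dict.ofList (((PySem.Dict.ofList orderedContent).get? (((PySem.Dict.ofList entry).get? "instanceType").getD "")).getD [])).keys
      (((PySem.Dict.ofList entry).get? "slug").getD "") 0
      (PySem.Dict.ofList (((PySem.Dict.ofList orderedContent).get? (((PySem.Dict.ofList entry).get? "instanceType").getD "")).getD [])).keys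
    = pvBLoop (((PySem.Dict.ofList entry).get? "slug").getD "")
      (PySem.Dict.ofList (((PySem.Dict.ofList orderedContent).get? (((PySem.Dict.ofList entry).get? "instanceType").getD "")).getD [])).values
      none none false
  exact pvLoop_eq _ _ [] _ none rfl (PySem.Dict.nodup_keys_ofList _)
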